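-- pv_equiv track=rewrite | github.com/IdanMeyer/C101-TestingInfra | test_ex3.py | min_swaps_from_internet
-- ===== SOURCE A (Python) =====
-- def min_swaps_from_internet(arr, n, k) :
--     count = 0
--     for i in range(0, n) :
--         if (arr[i] <= k) :
--             count = count + 1
--
--     # Find unwanted elements
--     # in current window of
--     # size 'count'
--     bad = 0
--     for i in range(0, count) :
--         if (arr[i] > k) :
--             bad = bad + 1
--
--     # Initialize answer with
--     # 'bad' value of current
--     # window
--     ans = bad
--     j = count
--     for i in range(0, n) :
--
--         if(j == n) :
--             break
--
--         # Decrement count of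
--         # previous window
--         if (arr[i] > k) :
--             bad = bad - 1
--
--         # Increment count of
--         # current window
--         if (arr[j] > k) :
--             bad = bad + 1
--
--         # Update ans if count
--         # of 'bad' is less in
--         # current window
--         ans = min(ans, bad)
--
--         j = j + 1
--
--     return ans
-- ===== SOURCE B (Python) =====
-- def min_swaps_from_internet(arr, n, k):
--     m = n if n > 0 else 0
--     # P[i] = number of elements > k among arr[:i]
--     P = [0]
--     for i in range(m):
--         P.append(P[i] + (1 if arr[i] > k else 0))
--     count = m - P[m]
--     return min(P[s + count] - P[s] for s in range(m - count + 1))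
-- ===== Notes on version B (the rewrite author's own statement) =====
-- stated objective: alternative
-- what changed: Replaced A's three incremental sliding-window loops (count pass, initial-window pass, break-guarded window-update loop) by one prefix-sum table P of '>k' counts and a direct min over P[s+count]-P[s] for all window starts.
import Mathlib
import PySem

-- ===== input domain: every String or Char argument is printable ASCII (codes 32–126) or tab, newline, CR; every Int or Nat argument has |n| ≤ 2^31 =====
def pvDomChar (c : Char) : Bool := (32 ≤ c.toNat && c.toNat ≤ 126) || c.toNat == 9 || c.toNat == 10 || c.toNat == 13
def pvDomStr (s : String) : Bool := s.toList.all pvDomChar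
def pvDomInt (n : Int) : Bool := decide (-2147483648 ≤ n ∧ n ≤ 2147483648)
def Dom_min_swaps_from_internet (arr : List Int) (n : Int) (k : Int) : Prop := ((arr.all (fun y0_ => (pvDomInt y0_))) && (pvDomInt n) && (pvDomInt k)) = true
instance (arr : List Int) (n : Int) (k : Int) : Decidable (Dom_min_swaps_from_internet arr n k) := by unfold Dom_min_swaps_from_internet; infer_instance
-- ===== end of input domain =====

-- B replaces A's three incremental sliding-window loops by one prefix-sum table P of '> k' counts
-- and a direct minimum over P[s+count]-P[s]; objective: alternative decomposition (same O(n) cost).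

-- ===== PORT A =====
-- state of A's third loop: (bad, ans, j, broke)
def stepA (arr : List Int) (n k : Int) (s : Int × Int × Int × Bool) (i : Int) : Int × Int × Int × Bool :=
  if s.2.2.2 then s
  else if s.2.2.1 = n then (s.1, s.2.1, s.2.2.1, true)
  else
    let b1 := if k < PySem.List.pyGetD arr i 0 then s.1 - 1 else s.1
    let b2 := if k < PySem.List.pyGetD arr s.2.2.1 0 then b1 + 1 else b1
    (b2, min s.2.1 b2, s.2.2.1 + 1, false)

def min_swaps_from_internet (arr : List Int) (n : Int) (k : Int) : Int :=
  let count := (PySem.List.pyRange 0 n 1).foldl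
    (fun c i => if PySem.List.pyGetD arr i 0 ≤ k then c + 1 else c) (0 : Int)
  let bad := (PySem.List.pyRange 0 count 1).foldl
    (fun b i => if k < PySem.List.pyGetD arr i 0 then b + 1 else b) (0 : Int)
  ((PySem.List.pyRange 0 n 1).foldl (stepA arr n k) (bad, bad, count, false)).2.1

-- ===== PORT B =====
def min_swaps_from_internet_alt (arr : List Int) (n : Int) (k : Int) : Int :=
  let m := if 0 < n then n else 0
  let P := (PySem.List.pyRange 0 m 1).foldl
    (fun (P : List Int) i =>
      P ++ [PySem.List.pyGetD P i 0 + (if k < PySem.List.pyGetD arr i 0 then 1 else 0)])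
    [(0 : Int)]
  let count := m - PySem.List.pyGetD P m 0
  let ws := (PySem.List.pyRange 0 (m - count + 1) 1).map
    (fun s => PySem.List.pyGetD P (s + count) 0 - PySem.List.pyGetD P s 0)
  ((PySem.List.min? ws (fun x => x)).getD 0)

-- ===== PRECONDITION & SPEC =====
-- A reads arr[i] for every i in range(n): it raises IndexError exactly when n > len(arr).
def Pre_min_swaps_from_internet (arr : List Int) (n : Int) (k : Int) : Prop :=
  n ≤ (arr.length : Int)
instance (arr : List Int) (n : Int) (k : Int) : Decidable (Pre_min_swaps_from_internet arr n k) := by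
  unfold Pre_min_swaps_from_internet; infer_instance
def pvWitness_min_swaps_from_internet : List Int × Int × Int := ([2, 1, 5, 6, 3], 5, 3)

def Spec_min_swaps_from_internet (arr : List Int) (n : Int) (k : Int) (out : Int) : Prop := out = min_swaps_from_internet_alt arr n k
instance (arr : List Int) (n : Int) (k : Int) (out : Int) : Decidable (Spec_min_swaps_from_internet arr n k out) := by unfold Spec_min_swaps_from_internet; infer_instance

-- ===== CLAIM (what is proved, stated in full; the proofs are below) =====
def Claim_equal_min_swaps_from_internet : Prop := ∀ (arr : List Int) (n : Int) (k : Int), Dom_min_swaps_from_internet arr n k → Pre_min_swaps_from_internet arr n k → Spec_min_swaps_from_internet arr n k (min_swaps_from_internet arr n k)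

-- ===== LEMMAS AND PROOFS =====

-- pvPref arr k s = number of elements > k among the first s entries of arr (the value P[s] in B)
def pvPref (arr : List Int) (k : Int) (s : Nat) : Int :=
  ((arr.take s).countP (fun x => decide (k < x)) : Nat)

theorem pvPref_zero (arr : List Int) (k : Int) : pvPref arr k 0 = 0 := by simp [pvPref]

theorem pvPref_succ (arr : List Int) (k : Int) (s : Nat) (h : s < arr.length) :
    pvPref arr k (s + 1) = pvPref arr k s + (if k < arr.getD s 0 then 1 else 0) := by
  unfold pvPref
  rw [List.take_add_one, List.getElem?_eq_getElem h, List.getD_eq_getElem arr 0 h]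
  simp only [Option.toList_some, List.countP_append, List.countP_singleton]
  split_ifs <;> simp_all

-- A's first loop
theorem countFold (arr : List Int) (k : Int) :
    ∀ (N : Nat) (c0 : Int), N ≤ arr.length →
      (List.range N).foldl (fun c i => if arr.getD i 0 ≤ k then c + 1 else c) c0
        = c0 + N - pvPref arr k N := by
  intro N
  induction N with
  | zero => intro c0 _; simp [pvPref]
  | succ N ih =>
      intro c0 hN
      rw [List.range_succ, List.foldl_append, ih c0 (by omega),
        pvPref_succ arr k N (by omega)]
      simp only [List.foldl_cons, List.foldl_nil]
      have : ¬ (arr.getD N 0 ≤ k) ↔ k < arr.getD N 0 := by omega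
      split_ifs with h1 h2 h2 <;> push_cast <;> omega

-- A's second loop / B's running prefix value
theorem badFold (arr : List Int) (k : Int) :
    ∀ (N : Nat) (b0 : Int), N ≤ arr.length →
      (List.range N).foldl (fun b i => if k < arr.getD i 0 then b + 1 else b) b0
        = b0 + pvPref arr k N := by
  intro N
  induction N with
  | zero => intro b0 _; simp [pvPref]
  | succ N ih =>
      intro b0 hN
      rw [List.range_succ, List.foldl_append, ih b0 (by omega),
        pvPref_succ arr k N (by omega)]
      simp only [List.foldl_cons, List.foldl_nil]
      split_ifs <;> omega

-- once A's loop has hit 'break', the remaining iterations do nothing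
theorem stepA_done (arr : List Int) (n k : Int) :
    ∀ (l : List Nat) (st : Int × Int × Int × Bool), st.2.2.2 = true →
      l.foldl (fun s (i : Nat) => stepA arr n k s (i : Int)) st = st := by
  intro l
  induction l with
  | nil => intro st _; simp
  | cons x t ih =>
      intro st hst
      rw [List.foldl_cons, show stepA arr n k st (x : Int) = st by simp [stepA, hst]]
      exact ih st hst

-- A's third loop computes the running minimum of window badness, pvPref (c+s) - pvPref s
theorem loopA (arr : List Int) (k : Int) (N c : Nat) (hN : N ≤ arr.length) :
    ∀ (len i0 : Nat) (acc : Int), i0 + len = N → c + i0 ≤ N →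
      (((List.range' i0 len).foldl (fun (s : Int × Int × Int × Bool) (i : Nat) => stepA arr (N : Int) k s (i : Int))
          (pvPref arr k (c + i0) - pvPref arr k i0, acc, ((c + i0 : Nat) : Int), false)).2.1)
        = ((List.range' (i0 + 1) (N - c - i0)).map
            (fun s => pvPref arr k (c + s) - pvPref arr k s)).foldl min acc := by
  intro len
  induction len with
  | zero =>
      intro i0 acc hlen hci
      have h1 : N - c - i0 = 0 := by omega
      simp [h1]
  | succ len ih =>
      intro i0 acc hlen hci
      rw [List.range'_succ, List.foldl_cons]
      by_cases hbrk : c + i0 = N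
      · have hstep : stepA arr (N : Int) k
            (pvPref arr k (c + i0) - pvPref arr k i0, acc, ((c + i0 : Nat) : Int), false) (i0 : Int)
            = (pvPref arr k (c + i0) - pvPref arr k i0, acc, ((c + i0 : Nat) : Int), true) := by
          simp [stepA, hbrk]
        rw [hstep, stepA_done arr (N : Int) k _ _ rfl]
        have h1 : N - c - i0 = 0 := by omega
        simp [h1]
      · have hlt : c + i0 < N := by omega
        have hi0 : i0 < arr.length := by omega
        have hci0 : c + i0 < arr.length := by omega
        have hkey : (if k < arr.getD (c + i0) 0 then
              (if k < arr.getD i0 0 then pvPref arr k (c + i0) - pvPref arr k i0 - 1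
               else pvPref arr k (c + i0) - pvPref arr k i0) + 1
            else (if k < arr.getD i0 0 then pvPref arr k (c + i0) - pvPref arr k i0 - 1
               else pvPref arr k (c + i0) - pvPref arr k i0))
            = pvPref arr k (c + (i0 + 1)) - pvPref arr k (i0 + 1) := by
          rw [show c + (i0 + 1) = (c + i0) + 1 by omega,
            pvPref_succ arr k (c + i0) hci0, pvPref_succ arr k i0 hi0]
          split_ifs <;> omega
        have hne : ¬ (((c + i0 : Nat) : Int) = (N : Int)) := by
          intro h; exact hbrk (by exact_mod_cast h)
        have hb2 : stepA arr (N : Int) k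
            (pvPref arr k (c + i0) - pvPref arr k i0, acc, ((c + i0 : Nat) : Int), false) (i0 : Int)
            = (pvPref arr k (c + (i0 + 1)) - pvPref arr k (i0 + 1),
               min acc (pvPref arr k (c + (i0 + 1)) - pvPref arr k (i0 + 1)),
               ((c + (i0 + 1) : Nat) : Int), false) := by
          simp only [stepA, PySem.List.pyGetD_natCast, Bool.false_eq_true, if_false,
            if_neg hne, Prod.mk.injEq]
          refine ⟨hkey, by rw [hkey], by push_cast; ring, trivial⟩
        rw [hb2, ih (i0 + 1) _ (by omega) (by omega)]
        have hrange : N - c - i0 = (N - c - (i0 + 1)) + 1 := by omega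
        rw [hrange, List.range'_succ, List.map_cons, List.foldl_cons]

-- B's first loop builds exactly the table of prefix counts
theorem Pbuild (arr : List Int) (k : Int) :
    ∀ (N : Nat), N ≤ arr.length →
      (List.range N).foldl
        (fun (P : List Int) (i : Nat) =>
          P ++ [P.getD i 0 + (if k < arr.getD i 0 then 1 else 0)])
        [(0 : Int)]
        = (List.range (N + 1)).map (fun s => pvPref arr k s) := by
  intro N
  induction N with
  | zero => simp [pvPref]
  | succ N ih =>
      intro hN
      rw [List.range_succ, List.foldl_append, ih (by omega)]
      simp only [List.foldl_cons, List.foldl_nil]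
      rw [PySem.List.getD_map_range (fun s => pvPref arr k s) (N + 1) N 0 (by omega)]
      rw [show List.range (N + 1 + 1) = List.range (N + 1) ++ [N + 1] from List.range_succ,
        List.map_append]
      have := pvPref_succ arr k N (by omega)
      simp [this]

-- the n ≤ 0 case: both programs return 0
theorem both_zero (arr : List Int) (n k : Int) (hn : n ≤ 0) :
    min_swaps_from_internet arr n k = 0 ∧ min_swaps_from_internet_alt arr n k = 0 := by
  have h0 : n.toNat = 0 := by omega
  have hnpos : ¬ (0 < n) := by omega
  constructor
  · simp [min_swaps_from_internet, PySem.List.pyRange_zero, h0, stepA]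
  · simp [min_swaps_from_internet_alt, hnpos, PySem.List.pyRange_zero, h0,
      PySem.List.pyGetD_natCast, PySem.List.min?_id_cons]

-- ===== VERDICT (by name: the statement is the Claim_ definition above) =====
theorem min_swaps_from_internet_spec : Claim_equal_min_swaps_from_internet := by
  unfold Claim_equal_min_swaps_from_internet
  intro arr n k _ hpre
  unfold Spec_min_swaps_from_internet
  unfold Pre_min_swaps_from_internet at hpre
  by_cases hn : n ≤ 0
  · obtain ⟨hA, hB⟩ := both_zero arr n k hn
    rw [hA, hB]
  · -- main case: 0 < n ≤ arr.length
    push_neg at hn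
    obtain ⟨N, hN⟩ : ∃ N : Nat, n = (N : Int) := ⟨n.toNat, (Int.toNat_of_nonneg (by omega)).symm⟩
    subst hN
    have hlen : N ≤ arr.length := by exact_mod_cast hpre
    set cnt := (arr.take N).countP (fun x => decide (k < x)) with hcnt_def
    have hcnt_le : cnt ≤ N := by
      have h1 : cnt ≤ (arr.take N).length := List.countP_le_length
      have h2 : (arr.take N).length = N := by simp [List.length_take]; omega
      omega
    set c := N - cnt with hc_def
    have hpN : pvPref arr k N = (cnt : Int) := by simp [pvPref, hcnt_def]
    have hcN : ((N : Int)) - pvPref arr k N = (c : Int) := by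
      rw [hpN]; push_cast; omega
    -- A side
    have hA : min_swaps_from_internet arr (N : Int) k
        = ((List.range' 1 (N - c)).map
            (fun s => pvPref arr k (c + s) - pvPref arr k s)).foldl min (pvPref arr k c) := by
      unfold min_swaps_from_internet
      simp only [PySem.List.pyRange_zero, List.foldl_map, PySem.List.pyGetD_natCast,
        Int.toNat_natCast]
      rw [countFold arr k N 0 hlen]
      rw [show (0 : Int) + (N : Int) - pvPref arr k N = ((c : Nat) : Int) by
        rw [hpN]; push_cast; omega]
      rw [Int.toNat_natCast]
      rw [badFold arr k c 0 (by omega), zero_add]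
      rw [show ((pvPref arr k c, pvPref arr k c, ((c : Nat) : Int), false) :
            Int × Int × Int × Bool)
          = (pvPref arr k (c + 0) - pvPref arr k 0, pvPref arr k c, ((c + 0 : Nat) : Int), false) by
        simp [pvPref_zero]]
      rw [List.range_eq_range',
        loopA arr k N c hlen N 0 (pvPref arr k c) (by omega) (by omega)]
      norm_num [List.foldl_map]
    -- B side
    have hB : min_swaps_from_internet_alt arr (N : Int) k
        = ((List.range' 1 (N - c)).map
            (fun s => pvPref arr k (c + s) - pvPref arr k s)).foldl min (pvPref arr k c) := by
      unfold min_swaps_from_internet_alt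
      rw [if_pos (show (0 : Int) < (N : Int) by exact_mod_cast hn)]
      simp only [PySem.List.pyRange_zero, List.foldl_map, PySem.List.pyGetD_natCast,
        Int.toNat_natCast]
      rw [Pbuild arr k N hlen]
      rw [PySem.List.getD_map_range (fun s => pvPref arr k s) (N + 1) N 0 (by omega), hpN]
      rw [show (N : Int) - (cnt : Int) = ((c : Nat) : Int) by push_cast; omega]
      rw [show (N : Int) - ((c : Nat) : Int) + 1 = ((N - c + 1 : Nat) : Int) by push_cast; omega]
      rw [Int.toNat_natCast, List.map_map]
      have hmap : (List.range (N - c + 1)).map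
          ((fun s => PySem.List.pyGetD ((List.range (N + 1)).map (fun s => pvPref arr k s)) (s + ((c : Nat) : Int)) 0
             - PySem.List.pyGetD ((List.range (N + 1)).map (fun s => pvPref arr k s)) s 0) ∘ (fun kk : Nat => (kk : Int)))
          = (List.range (N - c + 1)).map (fun s : Nat => pvPref arr k (c + s) - pvPref arr k s) := by
        apply List.map_congr_left
        intro s hs
        have hs' : s < N - c + 1 := List.mem_range.mp hs
        simp only [Function.comp]
        rw [show ((s : Int)) + ((c : Nat) : Int) = ((s + c : Nat) : Int) by push_cast; ring,
          PySem.List.pyGetD_natCast, PySem.List.pyGetD_natCast,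
          PySem.List.getD_map_range (fun s => pvPref arr k s) (N + 1) (s + c) 0 (by omega),
          PySem.List.getD_map_range (fun s => pvPref arr k s) (N + 1) s 0 (by omega),
          Nat.add_comm s c]
      rw [hmap]
      rw [List.range_eq_range', List.range'_succ, List.map_cons, PySem.List.min?_id_cons]
      simp [pvPref_zero, List.foldl_map]
    rw [hA, hB]
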